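-- pv_equiv track=rewrite | github.com/metchel/poker | hand.py | get_multiples
-- ===== SOURCE A (Python) =====
-- from collections import Counter
--
-- def get_multiples(card_values):
--
--     counter = Counter(card_values)
--     max_count = 1
--     multiples = set()
--
--     for card_value, count in counter.items():
--         if count >= 2:
--             multiples.add(card_value)
--         if count > max_count:
--             max_count = count
--
--     return max_count, multiples
-- ===== SOURCE B (Python) =====
-- def get_multiples(card_values):
--     max_count = 1
--     multiples = set()
--     seen = set()
--     for v in card_values:
--         if v not in seen:
--             seen.add(v)
--             c = card_values.count(v)
--             if c >= 2:
--                 multiples.add(v)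
--             if c > max_count:
--                 max_count = c
--     return max_count, multiples
-- ===== Notes on version B (the rewrite author's own statement) =====
-- stated objective: alternative
-- what changed: Replaced the Counter hash-count plus items() loop by a single scan of the list itself that acts only at each value's first occurrence (tracked with a seen set) and obtains that value's frequency with list.count, so no Counter/frequency dict is ever built.
import Mathlib
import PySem

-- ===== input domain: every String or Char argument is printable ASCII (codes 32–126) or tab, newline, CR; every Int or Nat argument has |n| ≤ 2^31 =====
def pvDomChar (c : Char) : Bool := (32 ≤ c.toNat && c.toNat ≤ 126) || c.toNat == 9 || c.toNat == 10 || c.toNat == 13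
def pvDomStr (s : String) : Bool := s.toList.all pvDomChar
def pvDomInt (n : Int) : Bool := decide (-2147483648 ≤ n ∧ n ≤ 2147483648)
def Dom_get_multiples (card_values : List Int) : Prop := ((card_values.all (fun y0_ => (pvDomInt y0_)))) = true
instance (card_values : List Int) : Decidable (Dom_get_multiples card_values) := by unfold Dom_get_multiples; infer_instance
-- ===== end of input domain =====

-- B replaces A's Counter hash-counting + items() loop by a single first-occurrence scan of the
-- list itself (seen set + list.count); alternative decomposition, not claimed faster.

-- ===== PORT A =====
def get_multiples (card_values : List Int) : Int × List Int :=
  (PySem.Dict.counter card_values).items.foldl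
    (fun (st : Int × PySem.Set Int) p =>
      let multiples := if p.2 ≥ 2 then PySem.Set.add st.2 p.1 else st.2
      let max_count := if p.2 > st.1 then p.2 else st.1
      (max_count, multiples))
    (1, ([] : PySem.Set Int))

-- ===== PORT B =====
-- state: ((max_count, multiples), seen)
def get_multiples_alt (card_values : List Int) : Int × List Int :=
  (card_values.foldl
    (fun (st : (Int × PySem.Set Int) × PySem.Set Int) v =>
      if st.2.contains v then st
      else
        let seen := PySem.Set.add st.2 v
        let c : Int := (PySem.List.count card_values v : Int)
        let multiples := if c ≥ 2 then PySem.Set.add st.1.2 v else st.1.2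
        let max_count := if c > st.1.1 then c else st.1.1
        ((max_count, multiples), seen))
    ((1, ([] : PySem.Set Int)), ([] : PySem.Set Int))).1

-- ===== PRECONDITION & SPEC =====
def Spec_get_multiples (card_values : List Int) (out : Int × List Int) : Prop := out = get_multiples_alt card_values
instance (card_values : List Int) (out : Int × List Int) : Decidable (Spec_get_multiples card_values out) := by unfold Spec_get_multiples; infer_instance

-- ===== CLAIM (what is proved, stated in full; the proofs are below) =====
def Claim_equal_get_multiples : Prop := ∀ (card_values : List Int), Dom_get_multiples card_values → Spec_get_multiples card_values (get_multiples card_values)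

-- ===== LEMMAS AND PROOFS =====

/-- A fold of `PySem.Set.add` only appends: the start set is a prefix of the result. -/
theorem prefix_foldl_add (xs : List Int) (s : PySem.Set Int) :
    s <+: xs.foldl PySem.Set.add s := by
  induction xs generalizing s with
  | nil => exact List.prefix_refl s
  | cons x xs ih =>
    refine List.IsPrefix.trans ?_ (ih (PySem.Set.add s x))
    simp only [PySem.Set.add]
    split
    · exact List.prefix_refl s
    · exact ⟨[x], rfl⟩

/-- B's seen-guarded scan applies `g` exactly at the values that are new relative to `seen`,
in order of first occurrence, while `seen` grows to `PySem.Set.update seen xs`. -/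
theorem seen_fold {σ : Type} (g : σ → Int → σ) (xs : List Int) (s : σ) (seen : PySem.Set Int) :
    xs.foldl (fun (st : σ × PySem.Set Int) v =>
        if st.2.contains v then st else (g st.1 v, PySem.Set.add st.2 v)) (s, seen)
    = (((xs.foldl PySem.Set.add seen).drop seen.length).foldl g s,
        xs.foldl PySem.Set.add seen) := by
  induction xs generalizing s seen with
  | nil => simp
  | cons v xs ih =>
    cases hc : seen.contains v with
    | true =>
      have hadd : PySem.Set.add seen v = seen := by
        unfold PySem.Set.add; rw [hc]; rfl
      rw [List.foldl_cons, List.foldl_cons, hadd]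
      simp only [hc, if_true]
      exact ih s seen
    | false =>
      have hadd : PySem.Set.add seen v = seen ++ [v] := by
        unfold PySem.Set.add; rw [hc]; rfl
      rw [List.foldl_cons, List.foldl_cons, hadd]
      simp only [hc, Bool.false_eq_true, if_false]
      rw [ih (g s v) (seen ++ [v])]
      obtain ⟨t, ht⟩ := prefix_foldl_add xs (seen ++ [v])
      rw [← ht]
      rw [Prod.mk.injEq]
      refine ⟨?_, rfl⟩
      rw [List.drop_left' (l₁ := seen ++ [v]) rfl, List.append_assoc,
        List.drop_left' (l₁ := seen) rfl]
      rfl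

theorem pysem_count_eq (xs : List Int) (v : Int) :
    PySem.List.count xs v = List.count v xs := by
  simp [PySem.List.count]

-- ===== VERDICT (by name: the statement is the Claim_ definition above) =====
theorem get_multiples_spec : Claim_equal_get_multiples := by
  intro xs _
  unfold Spec_get_multiples get_multiples get_multiples_alt
  rw [seen_fold (g := fun (st : Int × PySem.Set Int) (v : Int) =>
        let c : Int := (PySem.List.count xs v : Int)
        let multiples := if c ≥ 2 then PySem.Set.add st.2 v else st.2
        let max_count := if c > st.1 then c else st.1
        (max_count, multiples))]
  rw [PySem.Dict.items_counter, List.foldl_map]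
  simp only [pysem_count_eq, ← PySem.Set.ofList_eq_foldl, List.length_nil, List.drop_zero]
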